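-- pv_equiv track=rewrite | github.com/captainpragmatic/PRAHO | services/platform/apps/audit/services.py | _get_action_category
-- ===== SOURCE A (Python) =====
-- def _get_action_category(action: str) -> str:
--     """Determine audit event category from action type"""
--     # Use a mapping approach to reduce branching complexity
--     category_mappings = {
--         "authentication": ["login_", "logout_", "session_", "account_", "password_", "2fa_"],
--         "account_management": ["profile_updated", "email_changed", "phone_updated", "name_changed"],
--         "privacy": ["privacy_", "gdpr_", "marketing_consent_", "cookie_consent_"],
--         "authorization": [
--             "role_assigned",
--             "role_removed",
--             "permission_granted",
--             "permission_revoked",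
--             "staff_role_changed",
--             "customer_",
--             "privilege_escalation_attempt",
--         ],
--         "security_event": ["security_", "suspicious_", "brute_force_", "malicious_", "data_breach_"],
--         "data_protection": ["data_export_", "data_deletion_"],
--         "integration": ["api_", "webhook_"],
--         "system_admin": ["system_", "backup_", "configuration_", "user_impersonation"],
--         "compliance": ["vat_", "efactura_", "data_retention", "tax_rule"],
--         "business_operation": [
--             "proforma_",
--             "invoice_",
--             "payment_",
--             "credit_",
--             "billing_",
--             "currency_conversion",
--             "order_",
--             "provisioning_",
--             "service_",
--             "domain_",
--             "support_ticket_",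
--         ],
--     }
--
--     # Check each category's patterns
--     for category, patterns in category_mappings.items():
--         for pattern in patterns:
--             if pattern.endswith("_"):  # Prefix pattern
--                 if action.startswith(pattern):
--                     return category
--             elif action == pattern:
--                 return category
--
--     # Default to business operation
--     return "business_operation"
-- ===== SOURCE B (Python) =====
-- """Two-phase lookup: O(1) dict hit for exact patterns, then one ordered prefix scan."""
--
-- _EXACT_CATEGORY = {
--     "profile_updated": "account_management",
--     "email_changed": "account_management",
--     "phone_updated": "account_management",
--     "name_changed": "account_management",
--     "role_assigned": "authorization",
--     "role_removed": "authorization",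
--     "permission_granted": "authorization",
--     "permission_revoked": "authorization",
--     "staff_role_changed": "authorization",
--     "privilege_escalation_attempt": "authorization",
--     "user_impersonation": "system_admin",
--     "data_retention": "compliance",
--     "tax_rule": "compliance",
--     "currency_conversion": "business_operation",
-- }
--
-- _PREFIX_CATEGORY = [
--     ("login_", "authentication"),
--     ("logout_", "authentication"),
--     ("session_", "authentication"),
--     ("account_", "authentication"),
--     ("password_", "authentication"),
--     ("2fa_", "authentication"),
--     ("privacy_", "privacy"),
--     ("gdpr_", "privacy"),
--     ("marketing_consent_", "privacy"),
--     ("cookie_consent_", "privacy"),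
--     ("customer_", "authorization"),
--     ("security_", "security_event"),
--     ("suspicious_", "security_event"),
--     ("brute_force_", "security_event"),
--     ("malicious_", "security_event"),
--     ("data_breach_", "security_event"),
--     ("data_export_", "data_protection"),
--     ("data_deletion_", "data_protection"),
--     ("api_", "integration"),
--     ("webhook_", "integration"),
--     ("system_", "system_admin"),
--     ("backup_", "system_admin"),
--     ("configuration_", "system_admin"),
--     ("vat_", "compliance"),
--     ("efactura_", "compliance"),
--     ("proforma_", "business_operation"),
--     ("invoice_", "business_operation"),
--     ("payment_", "business_operation"),
--     ("credit_", "business_operation"),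
--     ("billing_", "business_operation"),
--     ("order_", "business_operation"),
--     ("provisioning_", "business_operation"),
--     ("service_", "business_operation"),
--     ("domain_", "business_operation"),
--     ("support_ticket_", "business_operation"),
-- ]
--
--
-- def _get_action_category(action: str) -> str:
--     """Determine audit event category from action type"""
--     category = _EXACT_CATEGORY.get(action)
--     if category is not None:
--         return category
--     for prefix, category in _PREFIX_CATEGORY:
--         if action.startswith(prefix):
--             return category
--     return "business_operation"
-- ===== Notes on version B (the rewrite author's own statement) =====
-- stated objective: simpler
-- what changed: Replaces the nested per-category/per-pattern loop that tests each pattern's kind on every call by two precomputed flat structures: an exact-pattern dict consulted first in O(1), then a single ordered (prefix, category) list scanned once; valid because no exact pattern extends any prefix pattern.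
import Mathlib
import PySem

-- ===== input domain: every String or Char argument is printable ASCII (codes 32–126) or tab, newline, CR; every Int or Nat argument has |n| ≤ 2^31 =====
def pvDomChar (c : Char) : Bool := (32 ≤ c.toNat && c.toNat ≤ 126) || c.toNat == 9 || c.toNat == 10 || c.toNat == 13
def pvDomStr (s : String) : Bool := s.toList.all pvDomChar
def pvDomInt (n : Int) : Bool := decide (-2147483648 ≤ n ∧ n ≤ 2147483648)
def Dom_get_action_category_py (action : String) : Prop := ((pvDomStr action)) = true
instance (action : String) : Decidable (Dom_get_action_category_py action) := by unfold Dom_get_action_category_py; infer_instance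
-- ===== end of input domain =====

-- B replaces A's nested per-category pattern loop with a precomputed exact-match dict plus one flat ordered prefix list (objective: simpler).

-- ===== PORT A =====
def pvCategoryMappings : List (String × List String) := [
    ("authentication", ["login_", "logout_", "session_", "account_", "password_", "2fa_"]),
    ("account_management", ["profile_updated", "email_changed", "phone_updated", "name_changed"]),
    ("privacy", ["privacy_", "gdpr_", "marketing_consent_", "cookie_consent_"]),
    ("authorization", ["role_assigned", "role_removed", "permission_granted", "permission_revoked", "staff_role_changed", "customer_", "privilege_escalation_attempt"]),
    ("security_event", ["security_", "suspicious_", "brute_force_", "malicious_", "data_breach_"]),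
    ("data_protection", ["data_export_", "data_deletion_"]),
    ("integration", ["api_", "webhook_"]),
    ("system_admin", ["system_", "backup_", "configuration_", "user_impersonation"]),
    ("compliance", ["vat_", "efactura_", "data_retention", "tax_rule"]),
    ("business_operation", ["proforma_", "invoice_", "payment_", "credit_", "billing_", "currency_conversion", "order_", "provisioning_", "service_", "domain_", "support_ticket_"])]

def pvInnerA (action : String) : List String → Bool
  | [] => false
  | p :: ps =>
      (if PySem.Str.endswith p "_" then PySem.Str.startswith action p else action == p)
      || pvInnerA action ps

def pvOuterA (action : String) : List (String × List String) → String
  | [] => "business_operation"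
  | (cat, pats) :: rest =>
      if pvInnerA action pats then cat else pvOuterA action rest

def get_action_category_py (action : String) : String :=
  pvOuterA action pvCategoryMappings

-- ===== PORT B =====
def pvExactCategory : PySem.Dict String String := PySem.Dict.ofList [
    ("profile_updated", "account_management"),
    ("email_changed", "account_management"),
    ("phone_updated", "account_management"),
    ("name_changed", "account_management"),
    ("role_assigned", "authorization"),
    ("role_removed", "authorization"),
    ("permission_granted", "authorization"),
    ("permission_revoked", "authorization"),
    ("staff_role_changed", "authorization"),
    ("privilege_escalation_attempt", "authorization"),
    ("user_impersonation", "system_admin"),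
    ("data_retention", "compliance"),
    ("tax_rule", "compliance"),
    ("currency_conversion", "business_operation")]

def pvPrefixCategory : List (String × String) := [
    ("login_", "authentication"),
    ("logout_", "authentication"),
    ("session_", "authentication"),
    ("account_", "authentication"),
    ("password_", "authentication"),
    ("2fa_", "authentication"),
    ("privacy_", "privacy"),
    ("gdpr_", "privacy"),
    ("marketing_consent_", "privacy"),
    ("cookie_consent_", "privacy"),
    ("customer_", "authorization"),
    ("security_", "security_event"),
    ("suspicious_", "security_event"),
    ("brute_force_", "security_event"),
    ("malicious_", "security_event"),
    ("data_breach_", "security_event"),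
    ("data_export_", "data_protection"),
    ("data_deletion_", "data_protection"),
    ("api_", "integration"),
    ("webhook_", "integration"),
    ("system_", "system_admin"),
    ("backup_", "system_admin"),
    ("configuration_", "system_admin"),
    ("vat_", "compliance"),
    ("efactura_", "compliance"),
    ("proforma_", "business_operation"),
    ("invoice_", "business_operation"),
    ("payment_", "business_operation"),
    ("credit_", "business_operation"),
    ("billing_", "business_operation"),
    ("order_", "business_operation"),
    ("provisioning_", "business_operation"),
    ("service_", "business_operation"),
    ("domain_", "business_operation"),
    ("support_ticket_", "business_operation")]

def pvFirstPrefix (action : String) : List (String × String) → String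
  | [] => "business_operation"
  | (p, c) :: rest =>
      if PySem.Str.startswith action p then c else pvFirstPrefix action rest

def get_action_category_py_alt (action : String) : String :=
  match PySem.Dict.get? pvExactCategory action with
  | some c => c
  | none => pvFirstPrefix action pvPrefixCategory

-- ===== PRECONDITION & SPEC =====
def Spec_get_action_category_py (action : String) (out : String) : Prop := out = get_action_category_py_alt action
instance (action : String) (out : String) : Decidable (Spec_get_action_category_py action out) := by unfold Spec_get_action_category_py; infer_instance

-- ===== CLAIM (what is proved, stated in full; the proofs are below) =====
def Claim_equal_get_action_category_py : Prop := ∀ (action : String), Dom_get_action_category_py action → Spec_get_action_category_py action (get_action_category_py action)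

-- ===== LEMMAS AND PROOFS =====
theorem pv_if_or (a b : Prop) [Decidable a] [Decidable b] (x y : String) :
    (if a ∨ b then x else y) = if a then x else if b then x else y := by
  by_cases h : a <;> simp [h]

theorem pv_main (action : String) :
    get_action_category_py action = get_action_category_py_alt action := by
  by_cases h0 : action = "profile_updated"
  · subst h0; decide
  by_cases h1 : action = "email_changed"
  · subst h1; decide
  by_cases h2 : action = "phone_updated"
  · subst h2; decide
  by_cases h3 : action = "name_changed"
  · subst h3; decide
  by_cases h4 : action = "role_assigned"
  · subst h4; decide
  by_cases h5 : action = "role_removed"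
  · subst h5; decide
  by_cases h6 : action = "permission_granted"
  · subst h6; decide
  by_cases h7 : action = "permission_revoked"
  · subst h7; decide
  by_cases h8 : action = "staff_role_changed"
  · subst h8; decide
  by_cases h9 : action = "privilege_escalation_attempt"
  · subst h9; decide
  by_cases h10 : action = "user_impersonation"
  · subst h10; decide
  by_cases h11 : action = "data_retention"
  · subst h11; decide
  by_cases h12 : action = "tax_rule"
  · subst h12; decide
  by_cases h13 : action = "currency_conversion"
  · subst h13; decide
  simp [get_action_category_py, get_action_category_py_alt, pvCategoryMappings,
    pvExactCategory, pvPrefixCategory, pvOuterA, pvInnerA, pvFirstPrefix,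
    PySem.Dict.ofList, PySem.Dict.get?, pv_if_or,
    show PySem.Chars.endswith ['l', 'o', 'g', 'i', 'n', '_'] ['_'] = true from by decide,
    show PySem.Chars.endswith ['l', 'o', 'g', 'o', 'u', 't', '_'] ['_'] = true from by decide,
    show PySem.Chars.endswith ['s', 'e', 's', 's', 'i', 'o', 'n', '_'] ['_'] = true from by decide,
    show PySem.Chars.endswith ['a', 'c', 'c', 'o', 'u', 'n', 't', '_'] ['_'] = true from by decide,
    show PySem.Chars.endswith ['p', 'a', 's', 's', 'w', 'o', 'r', 'd', '_'] ['_'] = true from by decide,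
    show PySem.Chars.endswith ['2', 'f', 'a', '_'] ['_'] = true from by decide,
    show PySem.Chars.endswith ['p', 'r', 'o', 'f', 'i', 'l', 'e', '_', 'u', 'p', 'd', 'a', 't', 'e', 'd'] ['_'] = false from by decide,
    show PySem.Chars.endswith ['e', 'm', 'a', 'i', 'l', '_', 'c', 'h', 'a', 'n', 'g', 'e', 'd'] ['_'] = false from by decide,
    show PySem.Chars.endswith ['p', 'h', 'o', 'n', 'e', '_', 'u', 'p', 'd', 'a', 't', 'e', 'd'] ['_'] = false from by decide,
    show PySem.Chars.endswith ['n', 'a', 'm', 'e', '_', 'c', 'h', 'a', 'n', 'g', 'e', 'd'] ['_'] = false from by decide,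
    show PySem.Chars.endswith ['p', 'r', 'i', 'v', 'a', 'c', 'y', '_'] ['_'] = true from by decide,
    show PySem.Chars.endswith ['g', 'd', 'p', 'r', '_'] ['_'] = true from by decide,
    show PySem.Chars.endswith ['m', 'a', 'r', 'k', 'e', 't', 'i', 'n', 'g', '_', 'c', 'o', 'n', 's', 'e', 'n', 't', '_'] ['_'] = true from by decide,
    show PySem.Chars.endswith ['c', 'o', 'o', 'k', 'i', 'e', '_', 'c', 'o', 'n', 's', 'e', 'n', 't', '_'] ['_'] = true from by decide,
    show PySem.Chars.endswith ['r', 'o', 'l', 'e', '_', 'a', 's', 's', 'i', 'g', 'n', 'e', 'd'] ['_'] = false from by decide,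
    show PySem.Chars.endswith ['r', 'o', 'l', 'e', '_', 'r', 'e', 'm', 'o', 'v', 'e', 'd'] ['_'] = false from by decide,
    show PySem.Chars.endswith ['p', 'e', 'r', 'm', 'i', 's', 's', 'i', 'o', 'n', '_', 'g', 'r', 'a', 'n', 't', 'e', 'd'] ['_'] = false from by decide,
    show PySem.Chars.endswith ['p', 'e', 'r', 'm', 'i', 's', 's', 'i', 'o', 'n', '_', 'r', 'e', 'v', 'o', 'k', 'e', 'd'] ['_'] = false from by decide,
    show PySem.Chars.endswith ['s', 't', 'a', 'f', 'f', '_', 'r', 'o', 'l', 'e', '_', 'c', 'h', 'a', 'n', 'g', 'e', 'd'] ['_'] = false from by decide,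
    show PySem.Chars.endswith ['c', 'u', 's', 't', 'o', 'm', 'e', 'r', '_'] ['_'] = true from by decide,
    show PySem.Chars.endswith ['p', 'r', 'i', 'v', 'i', 'l', 'e', 'g', 'e', '_', 'e', 's', 'c', 'a', 'l', 'a', 't', 'i', 'o', 'n', '_', 'a', 't', 't', 'e', 'm', 'p', 't'] ['_'] = false from by decide,
    show PySem.Chars.endswith ['s', 'e', 'c', 'u', 'r', 'i', 't', 'y', '_'] ['_'] = true from by decide,
    show PySem.Chars.endswith ['s', 'u', 's', 'p', 'i', 'c', 'i', 'o', 'u', 's', '_'] ['_'] = true from by decide,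
    show PySem.Chars.endswith ['b', 'r', 'u', 't', 'e', '_', 'f', 'o', 'r', 'c', 'e', '_'] ['_'] = true from by decide,
    show PySem.Chars.endswith ['m', 'a', 'l', 'i', 'c', 'i', 'o', 'u', 's', '_'] ['_'] = true from by decide,
    show PySem.Chars.endswith ['d', 'a', 't', 'a', '_', 'b', 'r', 'e', 'a', 'c', 'h', '_'] ['_'] = true from by decide,
    show PySem.Chars.endswith ['d', 'a', 't', 'a', '_', 'e', 'x', 'p', 'o', 'r', 't', '_'] ['_'] = true from by decide,
    show PySem.Chars.endswith ['d', 'a', 't', 'a', '_', 'd', 'e', 'l', 'e', 't', 'i', 'o', 'n', '_'] ['_'] = true from by decide,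
    show PySem.Chars.endswith ['a', 'p', 'i', '_'] ['_'] = true from by decide,
    show PySem.Chars.endswith ['w', 'e', 'b', 'h', 'o', 'o', 'k', '_'] ['_'] = true from by decide,
    show PySem.Chars.endswith ['s', 'y', 's', 't', 'e', 'm', '_'] ['_'] = true from by decide,
    show PySem.Chars.endswith ['b', 'a', 'c', 'k', 'u', 'p', '_'] ['_'] = true from by decide,
    show PySem.Chars.endswith ['c', 'o', 'n', 'f', 'i', 'g', 'u', 'r', 'a', 't', 'i', 'o', 'n', '_'] ['_'] = true from by decide,
    show PySem.Chars.endswith ['u', 's', 'e', 'r', '_', 'i', 'm', 'p', 'e', 'r', 's', 'o', 'n', 'a', 't', 'i', 'o', 'n'] ['_'] = false from by decide,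
    show PySem.Chars.endswith ['v', 'a', 't', '_'] ['_'] = true from by decide,
    show PySem.Chars.endswith ['e', 'f', 'a', 'c', 't', 'u', 'r', 'a', '_'] ['_'] = true from by decide,
    show PySem.Chars.endswith ['d', 'a', 't', 'a', '_', 'r', 'e', 't', 'e', 'n', 't', 'i', 'o', 'n'] ['_'] = false from by decide,
    show PySem.Chars.endswith ['t', 'a', 'x', '_', 'r', 'u', 'l', 'e'] ['_'] = false from by decide,
    show PySem.Chars.endswith ['p', 'r', 'o', 'f', 'o', 'r', 'm', 'a', '_'] ['_'] = true from by decide,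
    show PySem.Chars.endswith ['i', 'n', 'v', 'o', 'i', 'c', 'e', '_'] ['_'] = true from by decide,
    show PySem.Chars.endswith ['p', 'a', 'y', 'm', 'e', 'n', 't', '_'] ['_'] = true from by decide,
    show PySem.Chars.endswith ['c', 'r', 'e', 'd', 'i', 't', '_'] ['_'] = true from by decide,
    show PySem.Chars.endswith ['b', 'i', 'l', 'l', 'i', 'n', 'g', '_'] ['_'] = true from by decide,
    show PySem.Chars.endswith ['c', 'u', 'r', 'r', 'e', 'n', 'c', 'y', '_', 'c', 'o', 'n', 'v', 'e', 'r', 's', 'i', 'o', 'n'] ['_'] = false from by decide,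
    show PySem.Chars.endswith ['o', 'r', 'd', 'e', 'r', '_'] ['_'] = true from by decide,
    show PySem.Chars.endswith ['p', 'r', 'o', 'v', 'i', 's', 'i', 'o', 'n', 'i', 'n', 'g', '_'] ['_'] = true from by decide,
    show PySem.Chars.endswith ['s', 'e', 'r', 'v', 'i', 'c', 'e', '_'] ['_'] = true from by decide,
    show PySem.Chars.endswith ['d', 'o', 'm', 'a', 'i', 'n', '_'] ['_'] = true from by decide,
    show PySem.Chars.endswith ['s', 'u', 'p', 'p', 'o', 'r', 't', '_', 't', 'i', 'c', 'k', 'e', 't', '_'] ['_'] = true from by decide,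
    PySem.Dict.update, PySem.Dict.insert, PySem.Dict.contains, PySem.Dict.empty,
    List.find?,
    h0, h1, h2, h3, h4, h5, h6, h7, h8, h9, h10, h11, h12, h13,
    show ("profile_updated" == action) = false from beq_eq_false_iff_ne.mpr (Ne.symm h0),
    show ("email_changed" == action) = false from beq_eq_false_iff_ne.mpr (Ne.symm h1),
    show ("phone_updated" == action) = false from beq_eq_false_iff_ne.mpr (Ne.symm h2),
    show ("name_changed" == action) = false from beq_eq_false_iff_ne.mpr (Ne.symm h3),
    show ("role_assigned" == action) = false from beq_eq_false_iff_ne.mpr (Ne.symm h4),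
    show ("role_removed" == action) = false from beq_eq_false_iff_ne.mpr (Ne.symm h5),
    show ("permission_granted" == action) = false from beq_eq_false_iff_ne.mpr (Ne.symm h6),
    show ("permission_revoked" == action) = false from beq_eq_false_iff_ne.mpr (Ne.symm h7),
    show ("staff_role_changed" == action) = false from beq_eq_false_iff_ne.mpr (Ne.symm h8),
    show ("privilege_escalation_attempt" == action) = false from beq_eq_false_iff_ne.mpr (Ne.symm h9),
    show ("user_impersonation" == action) = false from beq_eq_false_iff_ne.mpr (Ne.symm h10),
    show ("data_retention" == action) = false from beq_eq_false_iff_ne.mpr (Ne.symm h11),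
    show ("tax_rule" == action) = false from beq_eq_false_iff_ne.mpr (Ne.symm h12),
    show ("currency_conversion" == action) = false from beq_eq_false_iff_ne.mpr (Ne.symm h13)]

-- ===== VERDICT (by name: the statement is the Claim_ definition above) =====
theorem get_action_category_py_spec : Claim_equal_get_action_category_py := by
  intro action _
  unfold Spec_get_action_category_py
  exact pv_main action
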